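-- pv_equiv track=rewrite | github.com/pypi-data/pypi-mirror-403 | packages/hcom/hcom-0.6.13.tar.gz/hcom-0.6.13/src/hcom/commands/bundle.py | _parse_prepare_flags
-- ===== SOURCE A (Python) =====
-- def _parse_prepare_flags(argv: list[str]) -> tuple[str | None, int, int, bool]:
--     """Parse bundle prepare flags.
--
--     Returns:
--         (target_agent, last_transcript, last_events, compact)
--
--     Raises:
--         ValueError: If flag values are invalid
--     """
--     target_agent = None
--     last_transcript = 40
--     last_events = 10  # Per category
--     compact = False
--
--     i = 0
--     while i < len(argv):
--         if argv[i] == "--for" and i + 1 < len(argv):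
--             target_agent = argv[i + 1]
--             i += 2
--         elif argv[i] == "--last-transcript" and i + 1 < len(argv):
--             try:
--                 last_transcript = int(argv[i + 1])
--             except ValueError:
--                 raise ValueError("--last-transcript must be an integer (e.g., --last-transcript 20)")
--             i += 2
--         elif argv[i] == "--last-events" and i + 1 < len(argv):
--             try:
--                 last_events = int(argv[i + 1])
--             except ValueError:
--                 raise ValueError("--last-events must be an integer (e.g., --last-events 10)")
--             i += 2
--         elif argv[i] in ("--compact", "-c"):
--             compact = True
--             i += 1
--         else:
--             i += 1
--
--     return target_agent, last_transcript, last_events, compact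
-- ===== SOURCE B (Python) =====
-- def _parse_prepare_flags(argv):
--     # Phase 1: tokenize argv into (flag, value) directives, consuming via an iterator.
--     events = []
--     it = iter(argv)
--     for arg in it:
--         if arg in ("--for", "--last-transcript", "--last-events"):
--             val = next(it, None)
--             if val is not None:
--                 events.append((arg, val))
--         elif arg in ("--compact", "-c"):
--             events.append((arg, ""))
--     # Phase 2: fold the directives into the result tuple.
--     target_agent, last_transcript, last_events, compact = None, 40, 10, False
--     for flag, val in events:
--         if flag == "--for":
--             target_agent = val
--         elif flag == "--last-transcript":
--             try:
--                 last_transcript = int(val)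
--             except ValueError:
--                 raise ValueError("--last-transcript must be an integer (e.g., --last-transcript 20)")
--         elif flag == "--last-events":
--             try:
--                 last_events = int(val)
--             except ValueError:
--                 raise ValueError("--last-events must be an integer (e.g., --last-events 10)")
--         else:
--             compact = True
--     return target_agent, last_transcript, last_events, compact
-- ===== Notes on version B (the rewrite author's own statement) =====
-- stated objective: idiomatic
-- what changed: Replaced A's index-arithmetic while loop (i += 1/2 with i+1 bound checks) by a two-phase pipeline: an iterator pass tokenizes argv into a list of (flag, value) directives, then a second pass folds the directives into the result tuple.
import Mathlib
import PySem

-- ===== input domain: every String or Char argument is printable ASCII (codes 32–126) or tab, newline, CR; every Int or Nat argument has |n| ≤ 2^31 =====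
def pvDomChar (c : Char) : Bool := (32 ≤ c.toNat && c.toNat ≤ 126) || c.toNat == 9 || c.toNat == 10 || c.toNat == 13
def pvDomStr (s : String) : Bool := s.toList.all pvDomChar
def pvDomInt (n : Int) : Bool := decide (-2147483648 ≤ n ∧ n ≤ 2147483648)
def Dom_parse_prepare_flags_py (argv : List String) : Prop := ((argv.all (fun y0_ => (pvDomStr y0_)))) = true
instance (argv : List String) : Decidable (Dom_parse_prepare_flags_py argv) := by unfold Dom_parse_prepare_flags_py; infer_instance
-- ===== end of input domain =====

-- B replaces A's index-arithmetic while loop by a two-phase pipeline (tokenize into (flag, value)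
-- directives, then fold them into the result); objective: idiomatic, same cost.

-- ===== PORT A =====
-- A's while loop over index i: state (target_agent, last_transcript, last_events, compact);
-- 'i + 1 < len(argv)' is 'a second element exists'; int() failure (ValueError) is excluded by Pre_,
-- there the port keeps the old value (.getD).
def goA : List String → Option String → Int → Int → Bool → Option String × Int × Int × Bool
  | [], ta, lt, le, c => (ta, lt, le, c)
  | [a], ta, lt, le, c =>
    if a = "--compact" ∨ a = "-c" then (ta, lt, le, true) else (ta, lt, le, c)
  | a :: b :: t, ta, lt, le, c =>
    if a = "--for" then goA t (some b) lt le c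
    else if a = "--last-transcript" then goA t ta ((PySem.Int.ofStr? b).getD lt) le c
    else if a = "--last-events" then goA t ta lt ((PySem.Int.ofStr? b).getD le) c
    else if a = "--compact" ∨ a = "-c" then goA (b :: t) ta lt le true
    else goA (b :: t) ta lt le c

def parse_prepare_flags_py (argv : List String) : Option String × Int × Int × Bool :=
  goA argv none 40 10 false

-- ===== PORT B =====
-- Phase 1 of Source B: iterator consumption producing the directive list (a value flag at the very end
-- gets no directive: next(it, None) is exhausted).
def tokenizeB : List String → List (String × String)
  | [] => []
  | a :: rest =>
    if a = "--for" ∨ a = "--last-transcript" ∨ a = "--last-events" then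
      match rest with
      | [] => []
      | b :: t => (a, b) :: tokenizeB t
    else if a = "--compact" ∨ a = "-c" then (a, "") :: tokenizeB rest
    else tokenizeB rest

-- Phase 2 of Source B: one directive applied to the state (int() failure excluded by Pre_; .getD keeps the old value).
def stepB (st : Option String × Int × Int × Bool) (ev : String × String) : Option String × Int × Int × Bool :=
  if ev.1 = "--for" then (some ev.2, st.2.1, st.2.2.1, st.2.2.2)
  else if ev.1 = "--last-transcript" then (st.1, (PySem.Int.ofStr? ev.2).getD st.2.1, st.2.2.1, st.2.2.2)
  else if ev.1 = "--last-events" then (st.1, st.2.1, (PySem.Int.ofStr? ev.2).getD st.2.2.1, st.2.2.2)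
  else (st.1, st.2.1, st.2.2.1, true)

def parse_prepare_flags_py_alt (argv : List String) : Option String × Int × Int × Bool :=
  (tokenizeB argv).foldl stepB (none, 40, 10, false)

-- ===== PRECONDITION & SPEC =====
-- Pre_ excludes exactly the inputs on which A raises ValueError: a "--last-transcript"/"--last-events"
-- flag (at a position actually parsed as a flag) whose following value is not a valid Python int literal.
-- Which positions are flags (vs consumed values) is determined by argv's left-to-right flag/value shape,
-- so the exact condition is this stateless walk of that shape (no parse state, no fuel, no output computed).
def preAux : List String → Bool
  | [] => true
  | [_] => true
  | a :: b :: t =>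
    if a = "--for" then preAux t
    else if a = "--last-transcript" ∨ a = "--last-events" then
      (PySem.Int.ofStr? b).isSome && preAux t
    else preAux (b :: t)

def Pre_parse_prepare_flags_py (argv : List String) : Prop := preAux argv = true
instance (argv : List String) : Decidable (Pre_parse_prepare_flags_py argv) := by
  unfold Pre_parse_prepare_flags_py; infer_instance

def pvWitness_parse_prepare_flags_py : List String :=
  ["--for", "alice", "-c", "--last-events", "7", "--last-transcript"]

def Spec_parse_prepare_flags_py (argv : List String) (out : Option String × Int × Int × Bool) : Prop := out = parse_prepare_flags_py_alt argv
instance (argv : List String) (out : Option String × Int × Int × Bool) : Decidable (Spec_parse_prepare_flags_py argv out) := by unfold Spec_parse_prepare_flags_py; infer_instance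

-- ===== CLAIM (what is proved, stated in full; the proofs are below) =====
def Claim_equal_parse_prepare_flags_py : Prop := ∀ (argv : List String), Dom_parse_prepare_flags_py argv → Pre_parse_prepare_flags_py argv → Spec_parse_prepare_flags_py argv (parse_prepare_flags_py argv)

-- ===== LEMMAS AND PROOFS =====

theorem goA_eq_foldl_tokenizeB : ∀ (l : List String) (ta : Option String) (lt le : Int) (c : Bool),
    preAux l = true → goA l ta lt le c = (tokenizeB l).foldl stepB (ta, lt, le, c) := by
  intro l ta lt le c
  induction l, ta, lt, le, c using goA.induct with
  | case1 => intro _; simp [goA, tokenizeB]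
  | case2 a ta lt le c h =>
    intro _
    rcases h with h | h <;> subst h <;> simp [goA, tokenizeB, stepB]
  | case3 a ta lt le c h =>
    intro _
    by_cases hv : a = "--for" ∨ a = "--last-transcript" ∨ a = "--last-events" <;>
      simp [goA, tokenizeB, h, hv]
  | case4 b t ta lt le c ih =>
    intro hpre
    simp only [preAux] at hpre
    simp only [goA, tokenizeB]
    simp [stepB, ih (by simpa using hpre)]
  | case5 b t ta lt le c hne ih =>
    intro hpre
    simp only [preAux] at hpre
    simp at hpre
    simp only [goA, tokenizeB]
    simp [stepB, ih hpre.2]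
  | case6 b t ta lt le c h1 h2 ih =>
    intro hpre
    simp only [preAux] at hpre
    simp at hpre
    simp only [goA, tokenizeB]
    simp [stepB, ih hpre.2]
  | case7 a b t ta lt le c h1 h2 h3 h4 ih =>
    intro hpre
    have ha : ¬ (a = "--for" ∨ a = "--last-transcript" ∨ a = "--last-events") := by
      rintro (h | h | h) <;> [exact h1 h; exact h2 h; exact h3 h]
    simp only [preAux] at hpre
    rw [if_neg h1, if_neg (by rintro (h | h) <;> [exact h2 h; exact h3 h])] at hpre
    simp only [goA, tokenizeB, if_neg h1, if_neg h2, if_neg h3, if_pos h4, if_neg ha,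
      List.foldl_cons]
    have hstep : stepB (ta, lt, le, c) (a, "") = (ta, lt, le, true) := by
      simp [stepB, h1, h2, h3]
    rw [hstep]
    exact ih hpre
  | case8 a b t ta lt le c h1 h2 h3 h4 ih =>
    intro hpre
    have ha : ¬ (a = "--for" ∨ a = "--last-transcript" ∨ a = "--last-events") := by
      rintro (h | h | h) <;> [exact h1 h; exact h2 h; exact h3 h]
    simp only [preAux] at hpre
    rw [if_neg h1, if_neg (by rintro (h | h) <;> [exact h2 h; exact h3 h])] at hpre
    simp only [goA, tokenizeB, if_neg h1, if_neg h2, if_neg h3, if_neg h4, if_neg ha]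
    exact ih hpre

-- ===== VERDICT (by name: the statement is the Claim_ definition above) =====
theorem parse_prepare_flags_py_spec : Claim_equal_parse_prepare_flags_py := by
  intro argv _ hpre
  unfold Spec_parse_prepare_flags_py parse_prepare_flags_py parse_prepare_flags_py_alt
  exact goA_eq_foldl_tokenizeB argv none 40 10 false hpre
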